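-- pv_equiv track=rewrite | github.com/dplocki/advent-of-code | 2016/2016_01.py | walk_on_path
-- ===== SOURCE A (Python) =====
-- def parse(input: str):
--
--     def split_to_lines(input: str):
--         yield from input.split(", ")
--
--     for line in split_to_lines(input):
--         yield line[0], int(line[1:])
--
-- def walk_on_path(input: str):
--     NORTH = 0
--     EAST = 1
--     SOUTH = 2
--     WEST = 3
--
--     move_matrix = {
--         NORTH: (0, 1),
--         SOUTH: (0, -1),
--         WEST: (-1, 0),
--         EAST: (1, 0)
--     }
--
--     face = NORTH
--     coordinates = (0, 0)
--     for turn, steps in parse(input):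
--         face = (face + (1 if turn == 'R' else -1)) % 4
--         move_to = move_matrix[face]
--
--         for _ in range(steps):
--             coordinates = (coordinates[0] + move_to[0], coordinates[1] + move_to[1])
--             yield coordinates
-- ===== SOURCE B (Python) =====
-- def walk_on_path(input: str):
--     # Flatten the instructions into a stream of unit deltas (threading the facing
--     # through the turns), then produce the visited points with one prefix-sum pass.
--     MOVES = ((0, 1), (1, 0), (0, -1), (-1, 0))  # N, E, S, W
--     face = 0
--     deltas = []
--     for part in input.split(", "):
--         face = (face + (1 if part[0] == 'R' else -1)) % 4
--         deltas += [MOVES[face]] * int(part[1:])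
--     x = y = 0
--     out = []
--     for dx, dy in deltas:
--         x += dx
--         y += dy
--         out.append((x, y))
--     return out
-- ===== Notes on version B (the rewrite author's own statement) =====
-- stated objective: alternative
-- what changed: A emits coordinates from a nested step loop inside the turn-handling loop (a generator yielding as it walks); B first flattens the instructions into a list of unit delta vectors (threading the facing through the turns) and then computes the visited points in one separate prefix-sum pass over that list.
import Mathlib
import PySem

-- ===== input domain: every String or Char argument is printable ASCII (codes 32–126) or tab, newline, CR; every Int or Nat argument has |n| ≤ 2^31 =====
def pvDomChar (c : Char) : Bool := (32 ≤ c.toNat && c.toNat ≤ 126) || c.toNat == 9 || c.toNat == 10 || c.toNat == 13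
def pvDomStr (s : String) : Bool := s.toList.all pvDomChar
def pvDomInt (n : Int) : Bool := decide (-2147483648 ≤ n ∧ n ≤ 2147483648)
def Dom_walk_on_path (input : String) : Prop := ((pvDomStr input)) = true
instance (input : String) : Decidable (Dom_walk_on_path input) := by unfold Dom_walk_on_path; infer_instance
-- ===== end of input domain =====

-- B replaces A's nested emit-inside loop by a flatten-to-deltas pass followed by one prefix-sum pass (alternative decomposition, same cost).
-- A is a Python generator; both ports return the full list of yielded coordinates.

-- ===== PORT A =====
-- parse(input): yields (line[0], int(line[1:])) for each chunk of input.split(", ")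
def walk_parse (input : String) : List (Char × Int) :=
  ((PySem.Str.split? input ", ").getD []).map (fun line =>
    ((PySem.Str.pyGet? line 0).getD ' ', (PySem.Int.ofStr? (PySem.Str.slice line (some 1) none)).getD 0))

-- move_matrix, inserted in A's key order NORTH, SOUTH, WEST, EAST
def walkA_matrix : PySem.Dict Int (Int × Int) :=
  (((PySem.Dict.empty.insert 0 ((0 : Int), (1 : Int))).insert 2 (0, -1)).insert 3 (-1, 0)).insert 1 (1, 0)

-- body of A's inner 'for _ in range(steps)' loop
def walkA_inner_step (move_to : Int × Int) (s : (Int × Int) × List (Int × Int)) (_ : Int) :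
    (Int × Int) × List (Int × Int) :=
  let coordinates := (s.1.1 + move_to.1, s.1.2 + move_to.2)
  (coordinates, s.2 ++ [coordinates])

-- body of A's outer 'for turn, steps in parse(input)' loop; state = (face, coordinates, yielded)
def walkA_step (st : Int × (Int × Int) × List (Int × Int)) (ts : Char × Int) :
    Int × (Int × Int) × List (Int × Int) :=
  let face := PySem.Int.mod (st.1 + (if ts.1 = 'R' then 1 else -1)) 4
  let move_to := walkA_matrix.getD face (0, 0)
  (face, (PySem.List.pyRange 0 ts.2 1).foldl (walkA_inner_step move_to) (st.2.1, st.2.2))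

def walk_on_path (input : String) : List (Int × Int) :=
  ((walk_parse input).foldl walkA_step (0, (0, 0), [])).2.2

-- ===== PORT B =====
def walkB_moves : List (Int × Int) := [(0, 1), (1, 0), (0, -1), (-1, 0)]

-- body of B's delta-flattening loop; state = (face, deltas)
def walkB_delta_step (st : Int × List (Int × Int)) (part : String) : Int × List (Int × Int) :=
  let face := PySem.Int.mod (st.1 + (if (PySem.Str.pyGet? part 0).getD ' ' = 'R' then 1 else -1)) 4
  (face, st.2 ++ List.replicate ((PySem.Int.ofStr? (PySem.Str.slice part (some 1) none)).getD 0).toNat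
                   (walkB_moves.getD face.toNat (0, 0)))

-- body of B's prefix-sum loop; state = ((x, y), out)
def walkB_scan_step (st : (Int × Int) × List (Int × Int)) (d : Int × Int) :
    (Int × Int) × List (Int × Int) :=
  let c := (st.1.1 + d.1, st.1.2 + d.2)
  (c, st.2 ++ [c])

def walk_on_path_alt (input : String) : List (Int × Int) :=
  ((((PySem.Str.split? input ", ").getD []).foldl walkB_delta_step (0, [])).2.foldl
      walkB_scan_step ((0, 0), [])).2

-- ===== PRECONDITION & SPEC =====
-- Pre_ holds exactly where Python A returns normally: every chunk of the separator split
-- is nonempty (else line[0] raises IndexError) and its tail parses as an int (else ValueError).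
def Pre_walk_on_path (input : String) : Prop :=
  ∀ line ∈ (PySem.Str.split? input ", ").getD [],
    line ≠ "" ∧ (PySem.Int.ofStr? (PySem.Str.slice line (some 1) none)).isSome = true
instance (input : String) : Decidable (Pre_walk_on_path input) := by unfold Pre_walk_on_path; infer_instance
def pvWitness_walk_on_path : String := "R2, L3"
def Spec_walk_on_path (input : String) (out : List (Int × Int)) : Prop := out = walk_on_path_alt input
instance (input : String) (out : List (Int × Int)) : Decidable (Spec_walk_on_path input out) := by unfold Spec_walk_on_path; infer_instance

-- ===== CLAIM (what is proved, stated in full; the proofs are below) =====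
def Claim_equal_walk_on_path : Prop := ∀ (input : String), Dom_walk_on_path input → Pre_walk_on_path input → Spec_walk_on_path input (walk_on_path input)

-- ===== LEMMAS AND PROOFS =====

/-- The turn produced by chunk `p` from facing `f` (shared shape of both step bodies). -/
def pvFace (f : Int) (p : String) : Int :=
  PySem.Int.mod (f + (if (PySem.Str.pyGet? p 0).getD ' ' = 'R' then 1 else -1)) 4

/-- The step count of chunk `p`, clamped at 0 as both `range` and `list *` do. -/
def pvSteps (p : String) : Nat :=
  ((PySem.Int.ofStr? (PySem.Str.slice p (some 1) none)).getD 0).toNat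

def pvMove (face : Int) : Int × Int := walkB_moves.getD face.toNat (0, 0)

/-- The coordinates visited starting at `c` and applying the deltas `ds` in order. -/
def pvWalk (c : Int × Int) : List (Int × Int) → List (Int × Int)
  | [] => []
  | d :: ds => (c.1 + d.1, c.2 + d.2) :: pvWalk (c.1 + d.1, c.2 + d.2) ds

/-- The endpoint after applying the deltas `ds` from `c`. -/
def pvEnd (c : Int × Int) : List (Int × Int) → Int × Int
  | [] => c
  | d :: ds => pvEnd (c.1 + d.1, c.2 + d.2) ds

/-- The flattened delta list of the chunks `ps` starting at facing `f`, with the final facing. -/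
def pvDeltas (f : Int) : List String → Int × List (Int × Int)
  | [] => (f, [])
  | p :: ps =>
    let r := pvDeltas (pvFace f p) ps
    (r.1, List.replicate (pvSteps p) (pvMove (pvFace f p)) ++ r.2)

theorem pvWalk_append (ds₁ ds₂ : List (Int × Int)) : ∀ c,
    pvWalk c (ds₁ ++ ds₂) = pvWalk c ds₁ ++ pvWalk (pvEnd c ds₁) ds₂ := by
  induction ds₁ with
  | nil => intro c; simp [pvWalk, pvEnd]
  | cons d ds ih => intro c; simp [pvWalk, pvEnd, ih]

theorem pvEnd_append (ds₁ ds₂ : List (Int × Int)) : ∀ c,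
    pvEnd c (ds₁ ++ ds₂) = pvEnd (pvEnd c ds₁) ds₂ := by
  induction ds₁ with
  | nil => intro c; simp [pvEnd]
  | cons d ds ih => intro c; simp [pvEnd, ih]

/-- B's prefix-sum pass, characterised by `pvEnd`/`pvWalk`. -/
theorem scan_eq (ds : List (Int × Int)) : ∀ (c : Int × Int) (acc : List (Int × Int)),
    ds.foldl walkB_scan_step (c, acc) = (pvEnd c ds, acc ++ pvWalk c ds) := by
  induction ds with
  | nil => intro c acc; simp [pvWalk, pvEnd]
  | cons d ds ih => intro c acc; simp [walkB_scan_step, pvWalk, pvEnd, ih]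

/-- A's inner loop body iterated `n` times = walking `n` copies of the same delta. -/
theorem iterate_inner_eq (move : Int × Int) (n : Nat) :
    ∀ (c : Int × Int) (acc : List (Int × Int)),
    ((fun s => walkA_inner_step move s 0)^[n] (c, acc))
      = (pvEnd c (List.replicate n move), acc ++ pvWalk c (List.replicate n move)) := by
  induction n with
  | zero => intro c acc; simp [pvWalk, pvEnd]
  | succ n ih =>
    intro c acc
    rw [Function.iterate_succ_apply,
      show walkA_inner_step move (c, acc) 0
        = ((c.1 + move.1, c.2 + move.2), acc ++ [(c.1 + move.1, c.2 + move.2)]) from rfl,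
      ih]
    simp [List.replicate_succ, pvWalk, pvEnd]

/-- A fold that ignores its elements is iteration. -/
theorem foldl_ignore_elt_eq_iterate {α β : Type} (g : β → β) (l : List α) :
    ∀ (init : β), l.foldl (fun s _ => g s) init = g^[l.length] init := by
  induction l with
  | nil => intro init; simp
  | cons x xs ih => intro init; simp [List.foldl_cons, ih, Function.iterate_succ_apply]

theorem length_pyRange_one (n : Int) : (PySem.List.pyRange 0 n 1).length = n.toNat := by
  rcases (show n ≤ 0 ∨ 0 < n by omega) with h | h
  · rw [PySem.List.pyRange_one_eq_nil h]; simp; omega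
  · have hm : ∀ (k : Nat) (a b : Int), b - a = (k : Int) → a ≤ b → (PySem.List.pyRange a b 1).length = k := by
      intro k
      induction k with
      | zero =>
        intro a b h1 h2
        rw [PySem.List.pyRange_one_eq_nil (by omega)]; rfl
      | succ k ih =>
        intro a b h1 h2
        rw [PySem.List.pyRange_one_cons (by omega)]
        simp [ih (a + 1) b (by omega) (by omega)]
    have := hm n.toNat 0 n (by omega) (by omega)
    omega

/-- A's inner 'for _ in range(steps)' loop, characterised by `pvEnd`/`pvWalk`. -/
theorem inner_fold_eq (move : Int × Int) (k : Int) (c : Int × Int) (acc : List (Int × Int)) :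
    (PySem.List.pyRange 0 k 1).foldl (walkA_inner_step move) (c, acc)
      = (pvEnd c (List.replicate k.toNat move), acc ++ pvWalk c (List.replicate k.toNat move)) := by
  have hfn : (walkA_inner_step move) = (fun (s : (Int × Int) × List (Int × Int)) (_ : Int) =>
      (fun s => walkA_inner_step move s 0) s) := rfl
  rw [hfn, foldl_ignore_elt_eq_iterate, length_pyRange_one, iterate_inner_eq]

/-- A's move matrix looked up at `face ∈ [0,4)` agrees with B's tuple indexing. -/
theorem matrix_eq_moves (face : Int) (h0 : 0 ≤ face) (h4 : face < 4) :
    walkA_matrix.getD face (0, 0) = pvMove face := by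
  interval_cases face <;> decide

/-- B's delta-building fold, as a structural recursion. -/
theorem deltas_fold_eq (parts : List String) : ∀ (f : Int) (base : List (Int × Int)),
    parts.foldl walkB_delta_step (f, base) = ((pvDeltas f parts).1, base ++ (pvDeltas f parts).2) := by
  induction parts with
  | nil => intro f base; simp [pvDeltas]
  | cons p ps ih =>
    intro f base
    rw [List.foldl_cons,
      show walkB_delta_step (f, base) p
        = (pvFace f p, base ++ List.replicate (pvSteps p) (pvMove (pvFace f p))) from rfl,
      ih]
    simp [pvDeltas]

theorem walkA_step_def (st : Int × (Int × Int) × List (Int × Int)) (ts : Char × Int) :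
    walkA_step st ts
      = (PySem.Int.mod (st.1 + (if ts.1 = 'R' then 1 else -1)) 4,
         (PySem.List.pyRange 0 ts.2 1).foldl
           (walkA_inner_step
             (walkA_matrix.getD (PySem.Int.mod (st.1 + (if ts.1 = 'R' then 1 else -1)) 4) (0, 0)))
           (st.2.1, st.2.2)) := rfl

/-- A's outer fold produces exactly the walk along B's flattened deltas. -/
theorem A_fold_eq (parts : List String) : ∀ (f : Int) (c : Int × Int) (acc : List (Int × Int)),
    ((parts.map (fun line =>
        ((PySem.Str.pyGet? line 0).getD ' ', (PySem.Int.ofStr? (PySem.Str.slice line (some 1) none)).getD 0))).foldl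
      walkA_step (f, c, acc))
      = ((pvDeltas f parts).1, pvEnd c (pvDeltas f parts).2, acc ++ pvWalk c (pvDeltas f parts).2) := by
  induction parts with
  | nil => intro f c acc; simp [pvDeltas, pvEnd, pvWalk]
  | cons p ps ih =>
    intro f c acc
    rw [List.map_cons, List.foldl_cons]
    rw [walkA_step_def,
      matrix_eq_moves _ (PySem.Int.mod_nonneg _ (by norm_num)) (PySem.Int.mod_lt _ (by norm_num))]
    simp only []
    rw [inner_fold_eq, ih]
    show _ = ((pvDeltas f (p :: ps)).1, pvEnd c (pvDeltas f (p :: ps)).2, acc ++ pvWalk c (pvDeltas f (p :: ps)).2)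
    simp only [pvDeltas, pvFace, pvSteps]
    rw [pvEnd_append, pvWalk_append, List.append_assoc]

-- ===== VERDICT (by name: the statement is the Claim_ definition above) =====
theorem walk_on_path_spec : Claim_equal_walk_on_path := by
  intro input _ _
  unfold Spec_walk_on_path walk_on_path walk_on_path_alt walk_parse
  rw [A_fold_eq, deltas_fold_eq, scan_eq]
  simp
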